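-- pv_equiv track=rewrite | github.com/Joshua992700/ESEC-Portal | string_eq_checker.py | strings_are_equal_ignore_case
-- ===== SOURCE A (Python) =====
-- def strings_are_equal_ignore_case(str1, str2):
--     # Check if the lengths of the strings are different
--     if len(str1) != len(str2):
--         return False
--
--     # Convert both strings to lowercase manually and compare each character
--     for i in range(len(str1)):
--         char1 = str1[i]
--         char2 = str2[i]
--
--         # Convert char1 to lowercase
--         if 'A' <= char1 <= 'Z':
--             char1 = chr(ord(char1) + 32)
--
--         # Convert char2 to lowercase
--         if 'A' <= char2 <= 'Z':
--             char2 = chr(ord(char2) + 32)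
--
--         # Compare the characters
--         if char1 != char2:
--             return False
--
--     return True
-- ===== SOURCE B (Python) =====
-- def strings_are_equal_ignore_case(str1, str2):
--     table = {c: c + 32 for c in range(ord('A'), ord('Z') + 1)}
--     return str1.translate(table) == str2.translate(table)
-- ===== Notes on version B (the rewrite author's own statement) =====
-- stated objective: simpler
-- what changed: Replaces the length check plus per-index early-exit lowering loop with building an ASCII A-Z translation table once and comparing the two translated strings with a single ==.
import Mathlib
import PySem

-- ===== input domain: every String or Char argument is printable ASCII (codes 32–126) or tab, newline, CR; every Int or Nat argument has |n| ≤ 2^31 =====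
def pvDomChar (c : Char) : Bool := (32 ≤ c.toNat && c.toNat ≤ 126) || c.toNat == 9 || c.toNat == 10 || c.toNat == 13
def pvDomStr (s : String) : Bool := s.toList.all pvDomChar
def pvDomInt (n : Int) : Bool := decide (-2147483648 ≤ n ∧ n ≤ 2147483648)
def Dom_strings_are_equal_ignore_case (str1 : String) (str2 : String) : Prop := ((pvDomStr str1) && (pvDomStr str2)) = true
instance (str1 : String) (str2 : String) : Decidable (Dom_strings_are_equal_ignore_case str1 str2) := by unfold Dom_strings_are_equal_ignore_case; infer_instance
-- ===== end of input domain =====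

-- B replaces A's per-index early-exit loop with one A–Z translation pass per string and a single equality; objective: simpler.

-- ===== PORT A =====
-- the body of A's for-loop applied to one index's pair of characters, then early exit or continue
def pvALoop : List Char → List Char → Bool
  | c1 :: t1, c2 :: t2 =>
      let char1 := if 'A' ≤ c1 ∧ c1 ≤ 'Z' then Char.ofNat (c1.toNat + 32) else c1
      let char2 := if 'A' ≤ c2 ∧ c2 ≤ 'Z' then Char.ofNat (c2.toNat + 32) else c2
      if char1 ≠ char2 then false else pvALoop t1 t2
  | _, _ => true

def strings_are_equal_ignore_case (str1 : String) (str2 : String) : Bool :=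
  if str1.toList.length ≠ str2.toList.length then false
  else pvALoop str1.toList str2.toList

-- ===== PORT B =====
-- the translation table maps only 'A'..'Z' to the code 32 higher (Python's str.translate with that dict)
def pvTranslate (c : Char) : Char :=
  if 'A' ≤ c ∧ c ≤ 'Z' then Char.ofNat (c.toNat + 32) else c

def strings_are_equal_ignore_case_alt (str1 : String) (str2 : String) : Bool :=
  str1.toList.map pvTranslate == str2.toList.map pvTranslate

-- ===== PRECONDITION & SPEC =====
def Spec_strings_are_equal_ignore_case (str1 : String) (str2 : String) (out : Bool) : Prop := out = strings_are_equal_ignore_case_alt str1 str2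
instance (str1 : String) (str2 : String) (out : Bool) : Decidable (Spec_strings_are_equal_ignore_case str1 str2 out) := by unfold Spec_strings_are_equal_ignore_case; infer_instance

-- ===== CLAIM (what is proved, stated in full; the proofs are below) =====
def Claim_equal_strings_are_equal_ignore_case : Prop := ∀ (str1 : String) (str2 : String), Dom_strings_are_equal_ignore_case str1 str2 → Spec_strings_are_equal_ignore_case str1 str2 (strings_are_equal_ignore_case str1 str2)

-- ===== LEMMAS AND PROOFS =====
theorem pvALoop_eq_map (l1 l2 : List Char) (h : l1.length = l2.length) :
    pvALoop l1 l2 = (l1.map pvTranslate == l2.map pvTranslate) := by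
  induction l1 generalizing l2 with
  | nil => cases l2 with
    | nil => rfl
    | cons c t => simp at h
  | cons c1 t1 ih =>
    cases l2 with
    | nil => simp at h
    | cons c2 t2 =>
      simp only [List.length_cons, Nat.add_right_cancel_iff] at h
      simp only [pvALoop, pvTranslate, List.map, List.cons_beq_cons, ih t2 h]
      by_cases hc : (if 'A' ≤ c1 ∧ c1 ≤ 'Z' then Char.ofNat (c1.toNat + 32) else c1)
          = (if 'A' ≤ c2 ∧ c2 ≤ 'Z' then Char.ofNat (c2.toNat + 32) else c2) <;>
        simp [hc]

-- ===== VERDICT (by name: the statement is the Claim_ definition above) =====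
theorem strings_are_equal_ignore_case_spec : Claim_equal_strings_are_equal_ignore_case := by
  intro str1 str2 _
  unfold Spec_strings_are_equal_ignore_case strings_are_equal_ignore_case strings_are_equal_ignore_case_alt
  by_cases h : str1.toList.length = str2.toList.length
  · simp [h, pvALoop_eq_map _ _ h]
  · have : (str1.toList.map pvTranslate).length ≠ (str2.toList.map pvTranslate).length := by
      simpa using h
    simp only [h, ne_eq, not_false_eq_true, if_pos]
    exact (by symm; simp [beq_eq_false_iff_ne]; exact fun he => this (by rw [he]))
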